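-- pv_equiv track=rewrite | github.com/Lightless-Labs/third-thoughts | middens/python/techniques/hsmm.py | get_tool_categories
-- ===== SOURCE A (Python) =====
-- def get_tool_categories(tool_calls):
--     categories = {'read': 0, 'edit': 0, 'bash': 0, 'search': 0, 'skill': 0, 'other': 0}
--     if not tool_calls:
--         return categories, 0
--
--     for call in tool_calls:
--         name = call.get('name', '').lower()
--         if any(sub in name for sub in ['read', 'glob', 'grep']): categories['read'] = 1
--         elif any(sub in name for sub in ['edit', 'write']): categories['edit'] = 1
--         elif 'bash' in name: categories['bash'] = 1
--         elif any(sub in name for sub in ['websearch', 'webfetch']): categories['search'] = 1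
--         elif 'skill' in name: categories['skill'] = 1
--         else: categories['other'] = 1
--
--     return categories, len(tool_calls)
-- ===== SOURCE B (Python) =====
-- RULES = [
--     ('read', ['read', 'glob', 'grep']),
--     ('edit', ['edit', 'write']),
--     ('bash', ['bash']),
--     ('search', ['websearch', 'webfetch']),
--     ('skill', ['skill']),
-- ]
--
--
-- def get_tool_categories(tool_calls):
--     names = [call.get('name', '').lower() for call in tool_calls]
--     categories = {}
--     prior = []
--     for key, subs in RULES:
--         categories[key] = 1 if any(
--             any(s in n for s in subs) and not any(s in n for s in prior)
--             for n in names) else 0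
--         prior = prior + subs
--     categories['other'] = 1 if any(not any(s in n for s in prior) for n in names) else 0
--     return categories, len(tool_calls)
-- ===== Notes on version B (the rewrite author's own statement) =====
-- stated objective: alternative
-- what changed: Swaps the traversal order: instead of A's call-major loop with an elif cascade mutating flags, B makes one category-major pass per flag, testing whether any call name matches that category's substrings and none of the higher-priority substrings accumulated in a growing exclusion list; the empty-input special case disappears.
import Mathlib
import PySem

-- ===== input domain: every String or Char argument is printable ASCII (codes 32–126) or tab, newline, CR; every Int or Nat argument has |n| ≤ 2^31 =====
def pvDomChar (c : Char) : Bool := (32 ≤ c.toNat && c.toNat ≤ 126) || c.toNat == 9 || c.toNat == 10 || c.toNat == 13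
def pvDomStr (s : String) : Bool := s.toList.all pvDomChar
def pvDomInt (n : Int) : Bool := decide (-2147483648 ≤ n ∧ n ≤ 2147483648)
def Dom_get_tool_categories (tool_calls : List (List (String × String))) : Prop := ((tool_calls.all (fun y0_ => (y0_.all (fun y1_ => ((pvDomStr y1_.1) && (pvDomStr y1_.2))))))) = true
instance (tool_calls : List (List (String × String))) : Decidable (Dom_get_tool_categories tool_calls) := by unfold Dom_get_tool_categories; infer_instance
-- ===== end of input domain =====

-- B swaps the traversal order: instead of A's call-major loop with an elif cascade mutating
-- flags, B makes one category-major pass per flag with a growing exclusion list of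
-- higher-priority substrings (objective: alternative; same cost).

-- ===== PORT A =====
-- one iteration of A's for-loop body
def catStep (d : PySem.Dict String Int) (call : List (String × String)) : PySem.Dict String Int :=
  let name := PySem.Str.lower ((PySem.Dict.mk call).getD "name" "")
  if ["read", "glob", "grep"].any (fun sub => PySem.Str.isIn sub name) then d.insert "read" 1
  else if ["edit", "write"].any (fun sub => PySem.Str.isIn sub name) then d.insert "edit" 1
  else if PySem.Str.isIn "bash" name then d.insert "bash" 1
  else if ["websearch", "webfetch"].any (fun sub => PySem.Str.isIn sub name) then d.insert "search" 1
  else if PySem.Str.isIn "skill" name then d.insert "skill" 1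
  else d.insert "other" 1

def get_tool_categories (tool_calls : List (List (String × String))) : (List (String × Int)) × Int :=
  let categories : PySem.Dict String Int :=
    PySem.Dict.mk [("read", 0), ("edit", 0), ("bash", 0), ("search", 0), ("skill", 0), ("other", 0)]
  if tool_calls = [] then (categories.items, 0)
  else ((tool_calls.foldl catStep categories).items, (tool_calls.length : Int))

-- ===== PORT B =====
def bRules : List (String × List String) :=
  [("read", ["read", "glob", "grep"]), ("edit", ["edit", "write"]), ("bash", ["bash"]),
   ("search", ["websearch", "webfetch"]), ("skill", ["skill"])]

def get_tool_categories_alt (tool_calls : List (List (String × String))) : (List (String × Int)) × Int :=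
  let names := tool_calls.map (fun call => PySem.Str.lower ((PySem.Dict.mk call).getD "name" ""))
  let st := bRules.foldl
    (fun (acc : PySem.Dict String Int × List String) r =>
      (acc.1.insert r.1
          (if names.any (fun n =>
              (r.2.any (fun s => PySem.Str.isIn s n)) && !(acc.2.any (fun s => PySem.Str.isIn s n)))
           then (1 : Int) else 0),
       acc.2 ++ r.2))
    (PySem.Dict.mk [], [])
  ((st.1.insert "other"
      (if names.any (fun n => !(st.2.any (fun s => PySem.Str.isIn s n))) then (1 : Int) else 0)).items,
   (tool_calls.length : Int))

-- ===== PRECONDITION & SPEC =====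
def Spec_get_tool_categories (tool_calls : List (List (String × String))) (out : (List (String × Int)) × Int) : Prop := out = get_tool_categories_alt tool_calls
instance (tool_calls : List (List (String × String))) (out : (List (String × Int)) × Int) : Decidable (Spec_get_tool_categories tool_calls out) := by unfold Spec_get_tool_categories; infer_instance

-- ===== CLAIM (what is proved, stated in full; the proofs are below) =====
def Claim_equal_get_tool_categories : Prop := ∀ (tool_calls : List (List (String × String))), Dom_get_tool_categories tool_calls → Spec_get_tool_categories tool_calls (get_tool_categories tool_calls)

-- ===== LEMMAS AND PROOFS =====

-- the lowered name of a call
def nameOf (call : List (String × String)) : String :=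
  PySem.Str.lower ((PySem.Dict.mk call).getD "name" "")

-- the rules' substring lists and the six per-name category conditions, with B's
-- cumulative exclusion lists
def mAny (subs : List String) (n : String) : Bool := subs.any (fun s => PySem.Str.isIn s n)
def L1 : List String := ["read", "glob", "grep"]
def L2 : List String := ["edit", "write"]
def L3 : List String := ["bash"]
def L4 : List String := ["websearch", "webfetch"]
def L5 : List String := ["skill"]
def c1 (n : String) : Bool := mAny L1 n && !(mAny [] n)
def c2 (n : String) : Bool := mAny L2 n && !(mAny ([] ++ L1) n)
def c3 (n : String) : Bool := mAny L3 n && !(mAny (([] ++ L1) ++ L2) n)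
def c4 (n : String) : Bool := mAny L4 n && !(mAny ((([] ++ L1) ++ L2) ++ L3) n)
def c5 (n : String) : Bool := mAny L5 n && !(mAny (((([] ++ L1) ++ L2) ++ L3) ++ L4) n)
def c6 (n : String) : Bool := !(mAny ((((([] ++ L1) ++ L2) ++ L3) ++ L4) ++ L5) n)

-- the six-flag state A's loop maintains
def dict6 (a b c d e f : Int) : PySem.Dict String Int :=
  PySem.Dict.mk [("read", a), ("edit", b), ("bash", c), ("search", d), ("skill", e), ("other", f)]

-- does some call's name satisfy p?
def flag (p : String → Bool) (calls : List (List (String × String))) : Bool :=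
  calls.any (fun call => p (nameOf call))

lemma mAny_append (x y : List String) (n : String) : mAny (x ++ y) n = (mAny x n || mAny y n) := by
  simp [mAny]

lemma mAny_bash (n : String) : mAny L3 n = PySem.Str.isIn "bash" n := by
  simp [mAny, L3]

lemma mAny_skill (n : String) : mAny L5 n = PySem.Str.isIn "skill" n := by
  simp [mAny, L5]

lemma bool_false_of_not (b : Bool) (h : ¬ b = true) : b = false := by
  cases b; rfl; exact absurd rfl h

lemma catStep_dict6 (a b c d e f : Int) (call : List (String × String)) :
    catStep (dict6 a b c d e f) call =
      dict6 (if c1 (nameOf call) then 1 else a) (if c2 (nameOf call) then 1 else b)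
            (if c3 (nameOf call) then 1 else c) (if c4 (nameOf call) then 1 else d)
            (if c5 (nameOf call) then 1 else e) (if c6 (nameOf call) then 1 else f) := by
  unfold catStep
  dsimp only
  generalize hg : PySem.Str.lower ((PySem.Dict.mk call).getD "name" "") = n
  have hnn : nameOf call = n := hg
  rw [hnn]
  have g1 : (["read", "glob", "grep"].any (fun sub => PySem.Str.isIn sub n)) = mAny L1 n := rfl
  have g2 : (["edit", "write"].any (fun sub => PySem.Str.isIn sub n)) = mAny L2 n := rfl
  have g4 : (["websearch", "webfetch"].any (fun sub => PySem.Str.isIn sub n)) = mAny L4 n := rfl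
  rw [g1, g2, g4, ← mAny_bash, ← mAny_skill]
  have mnil : mAny ([] : List String) n = false := rfl
  by_cases h1 : mAny L1 n = true
  · simp [c1, c2, c3, c4, c5, c6, mAny_append, mnil, h1]; rfl
  · have e1 : mAny L1 n = false := bool_false_of_not _ h1
    by_cases h2 : mAny L2 n = true
    · simp [c1, c2, c3, c4, c5, c6, mAny_append, mnil, e1, h2]; rfl
    · have e2 : mAny L2 n = false := bool_false_of_not _ h2
      by_cases h3 : mAny L3 n = true
      · simp [c1, c2, c3, c4, c5, c6, mAny_append, mnil, e1, e2, h3]; rfl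
      · have e3 : mAny L3 n = false := bool_false_of_not _ h3
        by_cases h4 : mAny L4 n = true
        · simp [c1, c2, c3, c4, c5, c6, mAny_append, mnil, e1, e2, e3, h4]; rfl
        · have e4 : mAny L4 n = false := bool_false_of_not _ h4
          by_cases h5 : mAny L5 n = true
          · simp [c1, c2, c3, c4, c5, c6, mAny_append, mnil, e1, e2, e3, e4, h5]; rfl
          · have e5 : mAny L5 n = false := bool_false_of_not _ h5
            simp [c1, c2, c3, c4, c5, c6, mAny_append, mnil, e1, e2, e3, e4, e5]; rfl

lemma dict6_congr {x1 x2 x3 x4 x5 x6 y1 y2 y3 y4 y5 y6 : Int}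
    (h1 : x1 = y1) (h2 : x2 = y2) (h3 : x3 = y3) (h4 : x4 = y4) (h5 : x5 = y5) (h6 : x6 = y6) :
    dict6 x1 x2 x3 x4 x5 x6 = dict6 y1 y2 y3 y4 y5 y6 := by
  subst h1 h2 h3 h4 h5 h6; rfl

lemma if_or_merge (b c : Bool) (a : Int) :
    (if c then (1 : Int) else if b then 1 else a) = if (b || c) then 1 else a := by
  cases b <;> cases c <;> simp

lemma foldl_catStep (calls : List (List (String × String))) (a b c d e f : Int) :
    calls.foldl catStep (dict6 a b c d e f) =
      dict6 (if flag c1 calls then 1 else a) (if flag c2 calls then 1 else b)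
            (if flag c3 calls then 1 else c) (if flag c4 calls then 1 else d)
            (if flag c5 calls then 1 else e) (if flag c6 calls then 1 else f) := by
  induction calls generalizing a b c d e f with
  | nil => simp [flag]
  | cons call rest ih =>
      rw [List.foldl_cons, catStep_dict6, ih]
      simp only [flag, List.any_cons]
      exact dict6_congr (if_or_merge _ _ _) (if_or_merge _ _ _) (if_or_merge _ _ _)
        (if_or_merge _ _ _) (if_or_merge _ _ _) (if_or_merge _ _ _)

lemma any_map_flag (p : String → Bool) (calls : List (List (String × String))) :
    (calls.map (fun call => PySem.Str.lower ((PySem.Dict.mk call).getD "name" ""))).any p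
      = flag p calls := by
  simp only [flag, nameOf, List.any_map]
  rfl

-- ===== VERDICT (by name: the statement is the Claim_ definition above) =====
theorem get_tool_categories_spec : Claim_equal_get_tool_categories := by
  intro tool_calls _
  unfold Spec_get_tool_categories get_tool_categories get_tool_categories_alt
  by_cases h : tool_calls = []
  · subst h; rfl
  · simp only [if_neg h, bRules, List.foldl_cons, List.foldl_nil]
    have hcat : PySem.Dict.mk [("read", (0:Int)), ("edit", 0), ("bash", 0), ("search", 0), ("skill", 0), ("other", 0)] = dict6 0 0 0 0 0 0 := rfl
    rw [hcat, foldl_catStep]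
    simp only [any_map_flag]
    rfl
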